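-- pv_equiv track=rewrite | github.com/maxaaa9/Fundamentals | Fundamentals/29.09 - List Basics - exercise/Lists - additional tasks/list_manipulator.py | max_even_or_odd
-- ===== SOURCE A (Python) =====
-- def max_even_or_odd(my_list, odd_or_even) -> str:
--     if odd_or_even == "odd":
--         max_odd_list = [x for x in my_list if x % 2 != 0]
--         if len(max_odd_list) >= 1:
--             return str(max(max_odd_list))
--     elif odd_or_even == "even":
--         max_even_list = [x for x in my_list if x % 2 == 0]
--         if len(max_even_list) >= 1:
--             return str(max(max_even_list))
--     return odd_or_even
-- ===== SOURCE B (Python) =====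
-- def max_even_or_odd(my_list, odd_or_even) -> str:
--     # single pass: running best of the chosen parity, no intermediate filtered list
--     if odd_or_even == "odd":
--         pred = lambda x: x % 2 != 0
--     elif odd_or_even == "even":
--         pred = lambda x: x % 2 == 0
--     else:
--         return odd_or_even
--     best = None
--     for x in my_list:
--         if pred(x) and (best is None or x > best):
--             best = x
--     return odd_or_even if best is None else str(best)
-- ===== Notes on version B (the rewrite author's own statement) =====
-- stated objective: alternative
-- what changed: Replaces the build-filtered-list-then-max structure with one fused pass over my_list keeping an optional running best for the selected parity predicate; no intermediate list is materialised.
import Mathlib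
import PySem

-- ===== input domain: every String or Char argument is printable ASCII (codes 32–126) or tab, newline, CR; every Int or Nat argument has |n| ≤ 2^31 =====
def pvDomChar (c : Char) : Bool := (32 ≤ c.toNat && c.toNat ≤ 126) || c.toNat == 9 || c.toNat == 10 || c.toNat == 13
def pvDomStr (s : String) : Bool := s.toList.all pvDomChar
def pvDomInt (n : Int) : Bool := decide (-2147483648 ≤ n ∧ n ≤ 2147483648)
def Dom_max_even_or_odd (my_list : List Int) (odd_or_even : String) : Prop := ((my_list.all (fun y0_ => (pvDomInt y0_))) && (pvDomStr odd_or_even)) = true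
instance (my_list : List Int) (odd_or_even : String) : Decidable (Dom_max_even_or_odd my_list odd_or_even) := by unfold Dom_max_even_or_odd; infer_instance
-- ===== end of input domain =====

-- B fuses filter-then-max into one pass with an optional running best; equivalence of return values proved below.
-- ===== PORT A =====
def max_even_or_odd (my_list : List Int) (odd_or_even : String) : String :=
  if odd_or_even == "odd" then
    let max_odd_list := my_list.filter (fun x => PySem.Int.mod x 2 != 0)
    if max_odd_list.length ≥ 1 then
      match PySem.List.max? max_odd_list (fun y => y) with
      | some m => PySem.Int.toStr m
      | none => odd_or_even
    else odd_or_even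
  else if odd_or_even == "even" then
    let max_even_list := my_list.filter (fun x => PySem.Int.mod x 2 == 0)
    if max_even_list.length ≥ 1 then
      match PySem.List.max? max_even_list (fun y => y) with
      | some m => PySem.Int.toStr m
      | none => odd_or_even
    else odd_or_even
  else odd_or_even

-- ===== PORT B =====
-- the fused loop: optional running best over elements matching p
def altBest (p : Int → Bool) : List Int → Option Int → Option Int
  | [], best => best
  | x :: xs, best =>
    altBest p xs (if p x && (match best with | none => true | some b => decide (x > b)) then some x else best)

def max_even_or_odd_alt (my_list : List Int) (odd_or_even : String) : String :=
  if odd_or_even == "odd" then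
    match altBest (fun x => PySem.Int.mod x 2 != 0) my_list none with
    | none => odd_or_even
    | some b => PySem.Int.toStr b
  else if odd_or_even == "even" then
    match altBest (fun x => PySem.Int.mod x 2 == 0) my_list none with
    | none => odd_or_even
    | some b => PySem.Int.toStr b
  else odd_or_even

-- ===== PRECONDITION & SPEC =====
def Spec_max_even_or_odd (my_list : List Int) (odd_or_even : String) (out : String) : Prop := out = max_even_or_odd_alt my_list odd_or_even
instance (my_list : List Int) (odd_or_even : String) (out : String) : Decidable (Spec_max_even_or_odd my_list odd_or_even out) := by unfold Spec_max_even_or_odd; infer_instance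

-- ===== CLAIM (what is proved, stated in full; the proofs are below) =====
def Claim_equal_max_even_or_odd : Prop := ∀ (my_list : List Int) (odd_or_even : String), Dom_max_even_or_odd my_list odd_or_even → Spec_max_even_or_odd my_list odd_or_even (max_even_or_odd my_list odd_or_even)

-- ===== LEMMAS AND PROOFS =====

-- ===== VERDICT (by name: the statement is the Claim_ definition above) =====
theorem altBest_some (p : Int → Bool) (l : List Int) (b : Int) :
    altBest p l (some b) = some ((l.filter p).foldl max b) := by
  induction l generalizing b with
  | nil => simp [altBest]
  | cons x xs ih =>
    by_cases hp : p x
    · by_cases hx : x > b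
      · simp [altBest, hp, hx, ih, max_eq_right (le_of_lt hx)]
      · simp [altBest, hp, hx, ih, max_eq_left (not_lt.mp hx)]
    · simp [altBest, hp, ih]

theorem altBest_max? (p : Int → Bool) (l : List Int) :
    altBest p l none = PySem.List.max? (l.filter p) (fun y => y) := by
  induction l with
  | nil => simp [altBest, PySem.List.max?]
  | cons x xs ih =>
    by_cases hp : p x
    · simp [altBest, hp, altBest_some, PySem.List.max?_id_cons]
    · simp [altBest, hp, ih]

theorem branch_eq (p : Int → Bool) (l : List Int) (s : String) :
    (if (l.filter p).length ≥ 1 then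
        match PySem.List.max? (l.filter p) (fun y => y) with
        | some m => PySem.Int.toStr m
        | none => s
      else s)
    = (match altBest p l none with
       | none => s
       | some b => PySem.Int.toStr b) := by
  rw [altBest_max?]
  cases h : l.filter p with
  | nil => simp [PySem.List.max?]
  | cons y ys => simp [PySem.List.max?_id_cons]

theorem max_even_or_odd_spec : Claim_equal_max_even_or_odd := by
  intro my_list odd_or_even _
  unfold Spec_max_even_or_odd max_even_or_odd max_even_or_odd_alt
  by_cases h1 : odd_or_even == "odd"
  · simp only [h1, if_pos]
    exact branch_eq _ my_list odd_or_even
  · by_cases h2 : odd_or_even == "even"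
    · simp only [h1, h2, if_neg, if_pos, Bool.false_eq_true, not_false_iff]
      exact branch_eq _ my_list odd_or_even
    · simp [h1, h2]
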